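-- pv_equiv track=rewrite | github.com/hhhhhanxy/new-wdsc | examples/review_rules_example.py | check
-- ===== SOURCE A (Python) =====
-- def check(text, rules):
--     """检查段落格式"""
--     issues = []
--     lines = text.split('\n')
--
--     empty_line_count = 0
--     for i, line in enumerate(lines):
--         if line.strip() == '':
--             empty_line_count += 1
--             if empty_line_count > 2:
--                 issues.append(f'第{i+1}行：存在连续多个空行')
--         else:
--             empty_line_count = 0
--
--     return issues
-- ===== SOURCE B (Python) =====
-- def check(text, rules):
--     """检查段落格式 — run-based rewrite: scan maximal runs of blank lines instead of a counter"""
--     lines = text.split('\n')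
--     issues = []
--     n = len(lines)
--     i = 0
--     while i < n:
--         if lines[i].strip() == '':
--             j = i
--             while j < n and lines[j].strip() == '':
--                 j += 1
--             for k in range(i + 2, j):
--                 issues.append(f'第{k+1}行：存在连续多个空行')
--             i = j
--         else:
--             i += 1
--     return issues
-- ===== Notes on version B (the rewrite author's own statement) =====
-- stated objective: alternative
-- what changed: A keeps a running empty-line counter over a flat enumerate pass; B scans maximal runs of consecutive blank lines (inner while loop finds the run end) and emits one message per run line past the second via range(i+2, j).
import Mathlib
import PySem

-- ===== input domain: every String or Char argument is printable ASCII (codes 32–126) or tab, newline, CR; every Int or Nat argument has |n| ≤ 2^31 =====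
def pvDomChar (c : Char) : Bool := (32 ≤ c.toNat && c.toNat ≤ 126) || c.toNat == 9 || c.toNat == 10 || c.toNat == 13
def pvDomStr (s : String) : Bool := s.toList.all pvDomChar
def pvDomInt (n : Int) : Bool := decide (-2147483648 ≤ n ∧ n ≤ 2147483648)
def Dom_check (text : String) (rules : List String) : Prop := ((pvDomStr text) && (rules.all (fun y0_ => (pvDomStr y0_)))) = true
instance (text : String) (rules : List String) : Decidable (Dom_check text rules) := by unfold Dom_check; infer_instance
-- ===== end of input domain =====

-- B replaces A's running blank-line counter with a scan over maximal runs of blank lines (alternative decomposition, same cost).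

-- the f-string f'第{i+1}行：存在连续多个空行' (i the 0-based line index), shared by both ports
def mkIssue (i : Int) : String := "第" ++ PySem.Int.toStr (i + 1) ++ "行：存在连续多个空行"

-- ===== PORT A =====
-- body of A's for-loop: state = (issues, empty_line_count)
def stepA (st : List String × Int) (p : Int × String) : List String × Int :=
  if PySem.Str.strip p.2 == "" then
    let c := st.2 + 1
    ((if c > 2 then st.1 ++ [mkIssue p.1] else st.1), c)
  else (st.1, 0)

def check (text : String) (rules : List String) : List String :=
  let lines := (PySem.Str.split? text "\n").getD []   -- sep "\n" ≠ "", so split? is always some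
  ((PySem.List.enumerate lines).foldl stepA ([], 0)).1

-- ===== PORT B =====
-- inner while loop: length j - i of the maximal blank prefix
def blankLen : List String → Nat
  | [] => 0
  | l :: ls => if PySem.Str.strip l == "" then blankLen ls + 1 else 0

-- outer while loop over i, jumping a whole blank run at once and flagging its lines past the second
def runScan (i : Nat) (ls : List String) : List String :=
  match ls with
  | [] => []
  | l :: rest =>
    if h : (PySem.Str.strip l == "") = true then
      let r := blankLen (l :: rest)
      ((PySem.List.pyRange ((i : Int) + 2) ((i : Int) + (r : Int))).map mkIssue)
        ++ runScan (i + r) ((l :: rest).drop r)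
    else runScan (i + 1) rest
termination_by ls.length
decreasing_by
  · simp only [List.length_drop, List.length_cons]
    have : 1 ≤ blankLen (l :: rest) := by simp [blankLen, h]
    omega
  · simp

def check_alt (text : String) (rules : List String) : List String :=
  runScan 0 ((PySem.Str.split? text "\n").getD [])

-- ===== PRECONDITION & SPEC =====
def Spec_check (text : String) (rules : List String) (out : List String) : Prop := out = check_alt text rules
instance (text : String) (rules : List String) (out : List String) : Decidable (Spec_check text rules out) := by unfold Spec_check; infer_instance

-- ===== CLAIM (what is proved, stated in full; the proofs are below) =====
def Claim_equal_check : Prop := ∀ (text : String) (rules : List String), Dom_check text rules → Spec_check text rules (check text rules)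

-- ===== LEMMAS AND PROOFS =====

-- A's loop rephrased as a structural recursion emitting the issues directly
def goA (s cnt : Int) : List String → List String
  | [] => []
  | l :: ls =>
    if PySem.Str.strip l == "" then
      (if cnt + 1 > 2 then [mkIssue s] else []) ++ goA (s + 1) (cnt + 1) ls
    else goA (s + 1) 0 ls

theorem foldl_eq_goA (ls : List String) (s : Int) (acc : List String) (cnt : Int) :
    ((PySem.List.enumerate ls s).foldl stepA (acc, cnt)).1 = acc ++ goA s cnt ls := by
  induction ls generalizing s acc cnt with
  | nil => simp [goA, PySem.List.enumerate]
  | cons l ls ih =>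
    rw [PySem.List.enumerate_cons, List.foldl_cons]
    by_cases hb : (PySem.Str.strip l == "") = true
    · by_cases hc : cnt + 1 > 2
      · rw [show stepA (acc, cnt) (s, l) = (acc ++ [mkIssue s], cnt + 1) from by
            simp [stepA, hb, hc], ih]
        simp [goA, hb, hc]
      · rw [show stepA (acc, cnt) (s, l) = (acc, cnt + 1) from by simp [stepA, hb, hc], ih]
        simp [goA, hb, hc]
    · rw [show stepA (acc, cnt) (s, l) = (acc, 0) from by simp [stepA, hb], ih]
      simp [goA, hb]

-- a blank run of length r entered with counter c flags indices s + max(2-c,0) … s + r - 1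
theorem goA_run (ls : List String) (s : Int) (c : Nat) :
    goA s (c : Int) ls =
      ((PySem.List.pyRange (s + ((2 - (c : Int)) ⊔ 0)) (s + (blankLen ls : Int))).map mkIssue)
        ++ goA (s + (blankLen ls : Int)) 0 (ls.drop (blankLen ls)) := by
  induction ls generalizing s c with
  | nil =>
    rw [PySem.List.pyRange_one_eq_nil (by simp only [blankLen, Nat.cast_zero]; omega)]
    simp [goA, blankLen]
  | cons l ls ih =>
    by_cases hb : (PySem.Str.strip l == "") = true
    · have hr : blankLen (l :: ls) = blankLen ls + 1 := by simp [blankLen, hb]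
      simp only [goA, hb, if_true, hr, List.drop_succ_cons]
      have ihc := ih (s + 1) (c + 1)
      push_cast at ihc ⊢
      rw [ihc]
      rcases c with _ | _ | c
      · rw [show ((2:Int) - (0:Nat)) ⊔ 0 = 2 by norm_num,
            show ((2:Int) - ((0:Nat) + 1)) ⊔ 0 = 1 by norm_num]
        rw [show (s + 1 + 1 : Int) = s + 2 by ring,
            show (s + 1 + (blankLen ls : Int)) = s + ((blankLen ls : Int) + 1) by ring]
        norm_num
      · rw [show ((2:Int) - (1:Nat)) ⊔ 0 = 1 by norm_num,
            show ((2:Int) - ((1:Nat) + 1)) ⊔ 0 = 0 by norm_num]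
        rw [show (s + 1 + 0 : Int) = s + 1 by ring,
            show (s + 1 + (blankLen ls : Int)) = s + ((blankLen ls : Int) + 1) by ring]
        norm_num
      · push_cast
        have hgt : ((c:Int) + 1 + 1 + 1 > 2) := by omega
        rw [if_pos hgt]
        rw [show ((2:Int) - ((c:Int) + 1 + 1 + 1)) ⊔ 0 = 0 by omega,
            show ((2:Int) - ((c:Int) + 1 + 1)) ⊔ 0 = 0 by omega]
        rw [show (s + 1 + (blankLen ls : Int)) = s + ((blankLen ls : Int) + 1) by ring]
        rw [PySem.List.pyRange_one_cons (show s + 0 < s + ((blankLen ls : Int) + 1) by omega)]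
        rw [show (s + 0 + 1 : Int) = s + 1 + 0 by ring, show (s + 0 : Int) = s by ring]
        simp
    · have hr : blankLen (l :: ls) = 0 := by simp [blankLen, hb]
      rw [hr]
      rw [PySem.List.pyRange_one_eq_nil (by simp only [Nat.cast_zero]; omega)]
      simp [goA, hb]

-- unfolding equations for the well-founded runScan
theorem runScan_nil (i : Nat) : runScan i [] = [] := by rw [runScan]

theorem runScan_blank (i : Nat) (l : String) (rest : List String)
    (hb : (PySem.Str.strip l == "") = true) :
    runScan i (l :: rest) =
      ((PySem.List.pyRange ((i : Int) + 2) ((i : Int) + (blankLen (l :: rest) : Int))).map mkIssue)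
        ++ runScan (i + blankLen (l :: rest)) ((l :: rest).drop (blankLen (l :: rest))) := by
  rw [runScan]
  simp only [hb, dite_true]

theorem runScan_nonblank (i : Nat) (l : String) (rest : List String)
    (hb : ¬ (PySem.Str.strip l == "") = true) :
    runScan i (l :: rest) = runScan (i + 1) rest := by
  rw [runScan]
  simp only [hb]
  simp

theorem goA_eq_runScan (ls : List String) (i : Nat) :
    goA (i : Int) 0 ls = runScan i ls := by
  induction hn : ls.length using Nat.strong_induction_on generalizing ls i with
  | _ n IH =>
  match ls with
  | [] => rw [runScan_nil]; simp [goA]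
  | l :: rest =>
    by_cases hb : (PySem.Str.strip l == "") = true
    · have h0 := goA_run (l :: rest) (i : Int) 0
      have hr1 : 1 ≤ blankLen (l :: rest) := by simp [blankLen, hb]
      rw [show ((0:Nat) : Int) = (0 : Int) from rfl] at h0
      rw [show ((2:Int) - 0) ⊔ 0 = 2 from by norm_num] at h0
      rw [h0, runScan_blank i l rest hb]
      rw [show ((i : Int) + (blankLen (l :: rest) : Int)) = (((i + blankLen (l :: rest)) : Nat) : Int) from by push_cast; ring]
      rw [IH (((l :: rest).drop (blankLen (l :: rest))).length)
        (by simp only [List.length_drop, List.length_cons, ← hn]; omega)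
        _ _ rfl]
    · rw [runScan_nonblank i l rest hb]
      rw [show goA (i : Int) 0 (l :: rest) = goA ((i : Int) + 1) 0 rest from by simp [goA, hb]]
      rw [show ((i : Int) + 1) = (((i + 1 : Nat)) : Int) from by push_cast; ring]
      rw [IH rest.length (by simp [← hn]) rest (i + 1) rfl]

-- ===== VERDICT (by name: the statement is the Claim_ definition above) =====
theorem check_spec : Claim_equal_check := by
  intro text rules _
  unfold Spec_check check check_alt
  rw [foldl_eq_goA]
  simpa using goA_eq_runScan ((PySem.Str.split? text "\n").getD []) 0
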